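-- pv_equiv track=rewrite | github.com/Rajasekhar1131997/TIP102_Sessions | Unit_4/Week4Session1_SPSV2.py | simulate_meme_reposts
-- ===== SOURCE A (Python) =====
-- from collections import deque
--
-- def simulate_meme_reposts(memes, reposts):
--     q = deque((meme, count) for meme, count in zip(memes, reposts))
--     result = []
--     while q:
--         meme_id, remianing = q.popleft()
--         result.append(meme_id)
--         if remianing > 1:
--             q.append((meme_id, remianing-1))
--     return result
-- ===== SOURCE B (Python) =====
-- def simulate_meme_reposts(memes, reposts):
--     pairs = list(zip(memes, reposts))
--     if not pairs:
--         return []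
--     rounds = 1
--     for _, c in pairs:
--         if c > rounds:
--             rounds = c
--     result = []
--     for r in range(rounds):
--         for m, c in pairs:
--             if r == 0 or c > r:
--                 result.append(m)
--     return result
-- ===== Notes on version B (the rewrite author's own statement) =====
-- stated objective: alternative
-- what changed: Replaces the deque-based simulation (pop front, re-append with decremented count) by a two-level round/index iteration: compute the number of rounds as max(1, max count) and emit each meme in round r when r==0 or count>r, producing the same round-robin order with no queue.
import Mathlib
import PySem

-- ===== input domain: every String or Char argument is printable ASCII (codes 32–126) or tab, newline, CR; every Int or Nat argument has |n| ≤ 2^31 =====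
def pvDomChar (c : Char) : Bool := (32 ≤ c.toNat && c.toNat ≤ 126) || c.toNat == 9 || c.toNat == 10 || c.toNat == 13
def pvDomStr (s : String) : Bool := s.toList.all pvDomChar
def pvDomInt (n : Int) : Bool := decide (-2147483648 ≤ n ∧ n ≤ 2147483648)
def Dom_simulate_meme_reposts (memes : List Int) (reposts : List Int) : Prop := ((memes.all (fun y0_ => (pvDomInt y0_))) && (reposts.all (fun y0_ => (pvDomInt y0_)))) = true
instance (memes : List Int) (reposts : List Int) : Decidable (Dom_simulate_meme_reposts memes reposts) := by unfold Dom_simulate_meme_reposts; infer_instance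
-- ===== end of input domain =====

-- B replaces A's deque simulation by round/index iteration (max(1, max count) rounds,
-- emit meme in round r iff r==0 or count>r); same output, no speed claim.

-- ===== PORT A =====
-- termination measure for A's while loop: total remaining work in the queue
def pvW (q : List (Int × Int)) : Nat := (q.map (fun p => (max p.2 1).toNat)).sum

-- A's 'while q:' loop: pop front, emit, re-append with count-1 if count > 1.
-- The Nat fuel only makes the recursion structural; pvW q fuel is proved sufficient below.
def pvLoopA : Nat → List (Int × Int) → List Int
  | _, [] => []
  | 0, _ :: _ => []
  | fuel + 1, p :: q => p.1 :: pvLoopA fuel (q ++ if 1 < p.2 then [(p.1, p.2 - 1)] else [])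

def simulate_meme_reposts (memes : List Int) (reposts : List Int) : List Int :=
  pvLoopA (pvW (memes.zip reposts)) (memes.zip reposts)

-- ===== PORT B =====
def simulate_meme_reposts_alt (memes : List Int) (reposts : List Int) : List Int :=
  let pairs := memes.zip reposts
  if pairs = [] then []
  else
    let rounds := pairs.foldl (fun acc p => if p.2 > acc then p.2 else acc) 1
    (PySem.List.pyRange 0 rounds 1).foldl
      (fun acc r =>
        pairs.foldl (fun acc2 p => if r = 0 ∨ p.2 > r then acc2 ++ [p.1] else acc2) acc)
      []

-- ===== PRECONDITION & SPEC =====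
def Spec_simulate_meme_reposts (memes : List Int) (reposts : List Int) (out : List Int) : Prop := out = simulate_meme_reposts_alt memes reposts
instance (memes : List Int) (reposts : List Int) (out : List Int) : Decidable (Spec_simulate_meme_reposts memes reposts out) := by unfold Spec_simulate_meme_reposts; infer_instance

-- ===== CLAIM (what is proved, stated in full; the proofs are below) =====
def Claim_equal_simulate_meme_reposts : Prop := ∀ (memes : List Int) (reposts : List Int), Dom_simulate_meme_reposts memes reposts → Spec_simulate_meme_reposts memes reposts (simulate_meme_reposts memes reposts)

-- ===== LEMMAS AND PROOFS =====

-- the loop measure strictly decreases (cited by pvLoopW's decreasing_by)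
theorem pvW_lt (p : Int × Int) (q : List (Int × Int)) :
    pvW (q ++ if 1 < p.2 then [(p.1, p.2 - 1)] else []) < pvW (p :: q) := by
  simp only [pvW, List.map_append, List.sum_append, List.map_cons, List.sum_cons]
  split
  · rename_i h
    simp only [List.map_cons, List.map_nil, List.sum_cons, List.sum_nil]
    have h1 : (max (p.2 - 1) 1).toNat = (p.2 - 1).toNat := by
      rw [max_eq_left (by omega : (1:Int) ≤ p.2 - 1)]
    have h2 : (max p.2 1).toNat = p.2.toNat := by
      rw [max_eq_left (by omega : (1:Int) ≤ p.2)]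
    rw [h1, h2]
    omega
  · simp

-- proof-side fuel-free view of A's loop
def pvLoopW : List (Int × Int) → List Int
  | [] => []
  | p :: q => p.1 :: pvLoopW (q ++ if 1 < p.2 then [(p.1, p.2 - 1)] else [])
  termination_by q => pvW q
  decreasing_by exact pvW_lt p q

theorem pvW_pos (p : Int × Int) (q : List (Int × Int)) : 1 ≤ pvW (p :: q) := by
  simp only [pvW, List.map_cons, List.sum_cons]
  have : (1 : Int) ≤ max p.2 1 := le_max_right _ _
  omega

-- pvW q fuel suffices: the fueled loop computes the fuel-free one
theorem pvLoopA_eq_pvLoopW : ∀ (fuel : Nat) (q : List (Int × Int)),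
    pvW q ≤ fuel → pvLoopA fuel q = pvLoopW q := by
  intro fuel
  induction fuel with
  | zero =>
      intro q hq
      cases q with
      | nil => simp [pvLoopA, pvLoopW]
      | cons p q => have := pvW_pos p q; omega
  | succ fuel ih =>
      intro q hq
      cases q with
      | nil => simp [pvLoopA, pvLoopW]
      | cons p q =>
          rw [pvLoopA, pvLoopW]
          have hlt := pvW_lt p q
          rw [ih _ (by omega)]

-- one decrement round: keep pairs with count > 1, count decremented
def pvDec (q : List (Int × Int)) : List (Int × Int) :=
  q.filterMap (fun p => if 1 < p.2 then some (p.1, p.2 - 1) else none)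

-- the memes emitted in round r (B's inner loop)
def pvRow (r : Int) : List (Int × Int) → List Int
  | [] => []
  | p :: q => if r = 0 ∨ p.2 > r then p.1 :: pvRow r q else pvRow r q

-- the concatenation of rows r, r+1, …, r+R-1
def pvRowsFrom (r : Int) : Nat → List (Int × Int) → List Int
  | 0, _ => []
  | R + 1, q => pvRow r q ++ pvRowsFrom (r + 1) R q

-- unconditional rounds, as a proof-side recursion
def pvG : Nat → List (Int × Int) → List Int
  | 0, _ => []
  | R + 1, q => q.map Prod.fst ++ pvG R (pvDec q)

theorem pvLoopW_round_gen (q r : List (Int × Int)) :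
    pvLoopW (q ++ pvDec r) = q.map Prod.fst ++ pvLoopW (pvDec (r ++ q)) := by
  induction q generalizing r with
  | nil => simp
  | cons p q ih =>
      have h1 : (if 1 < p.2 then [(p.1, p.2 - 1)] else []) = pvDec [p] := by
        by_cases h : 1 < p.2 <;> simp [pvDec, h]
      have := ih (r ++ [p])
      simp only [List.cons_append, pvLoopW, List.append_assoc, h1]
      rw [show pvDec r ++ pvDec [p] = pvDec (r ++ [p]) by simp [pvDec]]
      rw [this]
      simp [pvDec]

theorem pvLoopW_round (q : List (Int × Int)) :
    pvLoopW q = q.map Prod.fst ++ pvLoopW (pvDec q) := by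
  have := pvLoopW_round_gen q []
  simpa [pvDec] using this

theorem pvDec_mem_bound {q : List (Int × Int)} {p : Int × Int} (hp : p ∈ pvDec q) :
    1 ≤ p.2 ∧ ∀ B : Int, (∀ x ∈ q, x.2 ≤ B) → p.2 ≤ B - 1 := by
  simp only [pvDec, List.mem_filterMap] at hp
  obtain ⟨x, hx, hix⟩ := hp
  split at hix
  · cases hix
    exact ⟨by omega, fun B hB => by have := hB x hx; simp; omega⟩
  · cases hix

theorem pvLoopW_eq_pvG : ∀ (R : Nat) (q : List (Int × Int)),
    (∀ p ∈ q, p.2 ≤ (R : Int)) → (q = [] ∨ 1 ≤ R) → pvLoopW q = pvG R q := by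
  intro R
  induction R with
  | zero =>
      intro q _ hne
      rcases hne with h | h
      · subst h; simp [pvLoopW, pvG]
      · omega
  | succ R ih =>
      intro q hb _
      rw [pvLoopW_round, pvG]
      congr 1
      apply ih
      · intro p hp
        have := (pvDec_mem_bound hp).2 ((R : Int) + 1) (by exact_mod_cast hb)
        omega
      · cases hd : pvDec q with
        | nil => exact Or.inl rfl
        | cons p t =>
            right
            have hp : p ∈ pvDec q := by rw [hd]; exact List.mem_cons_self
            have h1 := (pvDec_mem_bound hp).1
            have h2 := (pvDec_mem_bound hp).2 ((R : Int) + 1) (by exact_mod_cast hb)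
            omega

theorem pvRow_succ (r : Int) (hr : 0 ≤ r) (q : List (Int × Int)) :
    pvRow (r + 1) q = pvRow r (pvDec q) := by
  induction q with
  | nil => simp [pvRow, pvDec]
  | cons p q ih =>
      by_cases h1 : 1 < p.2
      · have hdec : pvDec (p :: q) = (p.1, p.2 - 1) :: pvDec q := by
          simp [pvDec, h1]
        by_cases h2 : r + 1 = 0 ∨ p.2 > r + 1
        · have h3 : r = 0 ∨ p.2 - 1 > r := by omega
          simp only [pvRow, hdec, if_pos h2, if_pos h3, ih]
        · have h3 : ¬ (r = 0 ∨ p.2 - 1 > r) := by omega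
          simp only [pvRow, hdec, if_neg h2, if_neg h3, ih]
      · have hdec : pvDec (p :: q) = pvDec q := by
          simp [pvDec, h1]
        have h2 : ¬ (r + 1 = 0 ∨ p.2 > r + 1) := by omega
        simp only [pvRow, hdec, if_neg h2, ih]

theorem pvRow_zero (q : List (Int × Int)) : pvRow 0 q = q.map Prod.fst := by
  induction q with
  | nil => simp [pvRow]
  | cons p q ih => simp [pvRow, ih]

theorem pvRowsFrom_succ (R : Nat) : ∀ (r : Int), 0 ≤ r → ∀ q,
    pvRowsFrom (r + 1) R q = pvRowsFrom r R (pvDec q) := by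
  induction R with
  | zero => intro r _ q; simp [pvRowsFrom]
  | succ R ih =>
      intro r hr q
      simp only [pvRowsFrom, pvRow_succ r hr, ih (r + 1) (by omega) q]

theorem pvG_eq_rowsFrom (R : Nat) : ∀ q, pvG R q = pvRowsFrom 0 R q := by
  induction R with
  | zero => intro q; simp [pvG, pvRowsFrom]
  | succ R ih =>
      intro q
      show q.map Prod.fst ++ pvG R (pvDec q) = pvRow 0 q ++ pvRowsFrom (0 + 1) R q
      rw [pvRow_zero, ih, ← pvRowsFrom_succ R 0 (le_refl 0) q]

theorem pvInner_foldl (r : Int) (q : List (Int × Int)) : ∀ acc : List Int,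
    q.foldl (fun acc2 p => if r = 0 ∨ p.2 > r then acc2 ++ [p.1] else acc2) acc
      = acc ++ pvRow r q := by
  induction q with
  | nil => intro acc; simp [pvRow]
  | cons p q ih =>
      intro acc
      by_cases h : r = 0 ∨ p.2 > r
      · simp only [List.foldl_cons, if_pos h, pvRow, ih, List.append_assoc,
          List.singleton_append]
      · simp only [List.foldl_cons, if_neg h, pvRow, ih]

theorem pvOuter_foldl (pairs : List (Int × Int)) (R : Nat) : ∀ (a : Int) (acc : List Int),
    (PySem.List.pyRange a (a + (R : Int)) 1).foldl
      (fun acc r =>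
        pairs.foldl (fun acc2 p => if r = 0 ∨ p.2 > r then acc2 ++ [p.1] else acc2) acc)
      acc = acc ++ pvRowsFrom a R pairs := by
  induction R with
  | zero =>
      intro a acc
      rw [PySem.List.pyRange_one_eq_nil (by omega)]
      simp [pvRowsFrom]
  | succ R ih =>
      intro a acc
      rw [show a + ((R + 1 : Nat) : Int) = (a + 1) + (R : Int) by push_cast; ring]
      rw [PySem.List.pyRange_one_cons (show a < (a + 1) + (R : Int) by omega)]
      simp only [List.foldl_cons]
      rw [pvInner_foldl a pairs, ih (a + 1) (acc ++ pvRow a pairs)]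
      simp [pvRowsFrom]

theorem pvFoldMax_le (q : List (Int × Int)) (a : Int) :
    a ≤ q.foldl (fun acc p => if p.2 > acc then p.2 else acc) a ∧
    ∀ p ∈ q, p.2 ≤ q.foldl (fun acc p => if p.2 > acc then p.2 else acc) a := by
  induction q generalizing a with
  | nil => simp
  | cons x q ih =>
      simp only [List.foldl_cons]
      by_cases h : x.2 > a
      · simp only [if_pos h]
        refine ⟨le_trans (le_of_lt h) (ih x.2).1, ?_⟩
        intro p hp
        rcases List.mem_cons.mp hp with h' | h'
        · rw [h']; exact (ih x.2).1
        · exact (ih x.2).2 p h'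
      · simp only [if_neg h]
        refine ⟨(ih a).1, ?_⟩
        intro p hp
        rcases List.mem_cons.mp hp with h' | h'
        · rw [h']; exact le_trans (by omega) (ih a).1
        · exact (ih a).2 p h'

-- ===== VERDICT (by name: the statement is the Claim_ definition above) =====
theorem simulate_meme_reposts_spec : Claim_equal_simulate_meme_reposts := by
  intro memes reposts _
  unfold Spec_simulate_meme_reposts simulate_meme_reposts simulate_meme_reposts_alt
  set pairs := memes.zip reposts with hpairs
  by_cases hnil : pairs = []
  · simp [hnil, pvLoopA, pvW]
  · simp only [if_neg hnil]
    rw [pvLoopA_eq_pvLoopW (pvW pairs) pairs (le_refl _)]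
    set rounds := pairs.foldl (fun acc p => if p.2 > acc then p.2 else acc) 1 with hr
    have hmax := pvFoldMax_le pairs 1
    have h1 : 1 ≤ rounds := hmax.1
    have hR : ((rounds.toNat : Nat) : Int) = rounds := by omega
    have hloop : pvLoopW pairs = pvG rounds.toNat pairs := by
      apply pvLoopW_eq_pvG
      · intro p hp
        rw [hR]
        exact hmax.2 p hp
      · right; omega
    have hout := pvOuter_foldl pairs rounds.toNat 0 []
    rw [show (0 : Int) + ((rounds.toNat : Nat) : Int) = rounds by omega] at hout
    rw [hout, hloop, pvG_eq_rowsFrom]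
    simp
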